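-- pv_equiv track=rewrite | github.com/sl1296/ai-test | w2v/zh/split_word.py | checkzh
-- ===== SOURCE A (Python) =====
-- def checkzh(x):
--     ce = 0
--     for i in x:
--         cc = 0
--         for j in i:
--             if(j>='a' and j<='z' or j>='A' and j<='Z'):
--                 cc += 1
--         if(cc==len(i)):
--             ce += 1
--     return ce
-- ===== SOURCE B (Python) =====
-- import re
--
-- _ALPHA = re.compile(r'[A-Za-z]*\Z')
--
-- def checkzh(x):
--     return sum(1 for i in x if _ALPHA.match(i))
-- ===== Notes on version B (the rewrite author's own statement) =====
-- stated objective: idiomatic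
-- what changed: Replaces the per-character counting loop plus count==len comparison with a single regex full-match test per item, summed by a generator.
import Mathlib
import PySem

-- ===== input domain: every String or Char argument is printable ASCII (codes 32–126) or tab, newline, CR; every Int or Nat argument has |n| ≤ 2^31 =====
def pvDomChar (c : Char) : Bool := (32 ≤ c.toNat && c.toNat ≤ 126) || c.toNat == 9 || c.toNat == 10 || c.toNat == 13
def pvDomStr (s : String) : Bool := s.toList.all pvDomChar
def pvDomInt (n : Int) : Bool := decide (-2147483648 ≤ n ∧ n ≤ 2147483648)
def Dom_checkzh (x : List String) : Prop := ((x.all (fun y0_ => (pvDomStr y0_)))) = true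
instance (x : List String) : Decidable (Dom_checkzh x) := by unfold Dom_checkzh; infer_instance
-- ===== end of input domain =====

-- B replaces A's per-character counting loop + count==len test by one regex full-match
-- [A-Za-z]*\Z per item, summed with a generator (idiomatic; same cost).


-- ===== PORT A =====
-- literal port: outer loop accumulating ce; inner loop counting alphabetic chars into cc
def checkzh (x : List String) : Int :=
  x.foldl (fun ce i =>
    let cc : Int := i.toList.foldl (fun cc j =>
      if ('a' ≤ j ∧ j ≤ 'z') ∨ ('A' ≤ j ∧ j ≤ 'Z') then cc + 1 else cc) 0
    if cc = (i.toList.length : Int) then ce + 1 else ce) 0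

-- ===== PORT B =====
-- regex fullmatch '[A-Za-z]*' on an ASCII string = every char is an ASCII letter
-- (exact on Dom: the pattern matches the whole string iff each char is in [A-Za-z])
def checkzhAlphaMatch (i : String) : Bool :=
  i.toList.all (fun j => ('a' ≤ j && j ≤ 'z') || ('A' ≤ j && j ≤ 'Z'))

-- sum(1 for i in x if match) = count of matching items
def checkzh_alt (x : List String) : Int :=
  (x.countP checkzhAlphaMatch : Int)

-- ===== PRECONDITION & SPEC =====
def Spec_checkzh (x : List String) (out : Int) : Prop := out = checkzh_alt x
instance (x : List String) (out : Int) : Decidable (Spec_checkzh x out) := by unfold Spec_checkzh; infer_instance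

-- ===== CLAIM (what is proved, stated in full; the proofs are below) =====
def Claim_equal_checkzh : Prop := ∀ (x : List String), Dom_checkzh x → Spec_checkzh x (checkzh x)

-- ===== LEMMAS AND PROOFS =====
-- the inner counting loop of A computes a countP
theorem checkzh_inner_count (l : List Char) (n : Int) :
    l.foldl (fun cc j =>
      if ('a' ≤ j ∧ j ≤ 'z') ∨ ('A' ≤ j ∧ j ≤ 'Z') then cc + 1 else cc) n
    = n + (l.countP (fun j => ('a' ≤ j && j ≤ 'z') || ('A' ≤ j && j ≤ 'Z')) : Int) := by
  induction l generalizing n with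
  | nil => simp
  | cons c t ih =>
    simp only [List.foldl_cons, List.countP_cons, ih]
    by_cases h : ('a' ≤ c ∧ c ≤ 'z') ∨ ('A' ≤ c ∧ c ≤ 'Z')
    · have hb : (('a' ≤ c && c ≤ 'z') || ('A' ≤ c && c ≤ 'Z')) = true := by
        simp only [Bool.or_eq_true, Bool.and_eq_true, decide_eq_true_eq]; exact h
      rw [if_pos h]; simp [hb]; ring
    · have hb : (('a' ≤ c && c ≤ 'z') || ('A' ≤ c && c ≤ 'Z')) = false := by
        simp only [Bool.or_eq_false_iff, Bool.and_eq_false_iff]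
        rcases not_or.mp h with ⟨h1, h2⟩
        constructor
        · rcases not_and_or.mp h1 with h | h <;> simp [h]
        · rcases not_and_or.mp h2 with h | h <;> simp [h]
      rw [if_neg h]; simp [hb]

-- A's per-item test (count == len) equals B's all-chars test
theorem checkzh_item_iff (i : String) :
    ((i.toList.foldl (fun cc j =>
      if ('a' ≤ j ∧ j ≤ 'z') ∨ ('A' ≤ j ∧ j ≤ 'Z') then cc + 1 else cc) 0 : Int)
      = (i.toList.length : Int)) ↔ checkzhAlphaMatch i = true := by
  rw [checkzh_inner_count]
  unfold checkzhAlphaMatch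
  rw [zero_add]
  constructor
  · intro h
    have : i.toList.countP (fun j => ('a' ≤ j && j ≤ 'z') || ('A' ≤ j && j ≤ 'Z'))
        = i.toList.length := by exact_mod_cast h
    rw [List.all_eq_true]
    intro j hj
    exact (List.countP_eq_length.mp this) j hj
  · intro h
    have : i.toList.countP (fun j => ('a' ≤ j && j ≤ 'z') || ('A' ≤ j && j ≤ 'Z'))
        = i.toList.length :=
      List.countP_eq_length.mpr (fun j hj => (List.all_eq_true.mp h) j hj)
    exact_mod_cast this

theorem checkzh_foldl_eq (x : List String) (n : Int) :
    x.foldl (fun ce i =>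
      let cc : Int := i.toList.foldl (fun cc j =>
        if ('a' ≤ j ∧ j ≤ 'z') ∨ ('A' ≤ j ∧ j ≤ 'Z') then cc + 1 else cc) 0
      if cc = (i.toList.length : Int) then ce + 1 else ce) n
    = n + (x.countP checkzhAlphaMatch : Int) := by
  induction x generalizing n with
  | nil => simp
  | cons i t ih =>
    simp only [List.foldl_cons, List.countP_cons, ih]
    by_cases h : checkzhAlphaMatch i = true
    · rw [if_pos ((checkzh_item_iff i).mpr h)]; simp [h]; ring
    · rw [if_neg (fun hc => h ((checkzh_item_iff i).mp hc))]
      simp [Bool.eq_false_iff.mpr h]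

-- ===== VERDICT (by name: the statement is the Claim_ definition above) =====
theorem checkzh_spec : Claim_equal_checkzh := by
  intro x _
  unfold Spec_checkzh checkzh checkzh_alt
  rw [checkzh_foldl_eq, zero_add]
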